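-- pv_equiv track=rewrite | github.com/mjmammoth/aoc-2022 | day-9/solution.py | shouldSegmentMove
-- ===== SOURCE A (Python) =====
-- def shouldSegmentMove(tailPos, headPos):
--     noNeedToMovePositions = set()
--     tailX = tailPos[0]
--     tailY = tailPos[1]
--     xPositions = list(range(tailX-1, tailX+2))
--     yPositions = list(range(tailY-1, tailY+2))
--     for x in xPositions:
--         for y in yPositions:
--             noNeedToMovePositions.add(str(f"{x}:{y}"))
--     headPos = f"{headPos[0]}:{headPos[1]}"
--     return not headPos in noNeedToMovePositions
-- ===== SOURCE B (Python) =====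
-- def shouldSegmentMove(tailPos, headPos):
--     return abs(headPos[0] - tailPos[0]) > 1 or abs(headPos[1] - tailPos[1]) > 1
-- ===== Notes on version B (the rewrite author's own statement) =====
-- stated objective: simpler
-- what changed: Replaces building a 9-element set of formatted "x:y" strings and testing membership with a direct Chebyshev-distance comparison: abs(dx) > 1 or abs(dy) > 1.
import Mathlib
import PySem

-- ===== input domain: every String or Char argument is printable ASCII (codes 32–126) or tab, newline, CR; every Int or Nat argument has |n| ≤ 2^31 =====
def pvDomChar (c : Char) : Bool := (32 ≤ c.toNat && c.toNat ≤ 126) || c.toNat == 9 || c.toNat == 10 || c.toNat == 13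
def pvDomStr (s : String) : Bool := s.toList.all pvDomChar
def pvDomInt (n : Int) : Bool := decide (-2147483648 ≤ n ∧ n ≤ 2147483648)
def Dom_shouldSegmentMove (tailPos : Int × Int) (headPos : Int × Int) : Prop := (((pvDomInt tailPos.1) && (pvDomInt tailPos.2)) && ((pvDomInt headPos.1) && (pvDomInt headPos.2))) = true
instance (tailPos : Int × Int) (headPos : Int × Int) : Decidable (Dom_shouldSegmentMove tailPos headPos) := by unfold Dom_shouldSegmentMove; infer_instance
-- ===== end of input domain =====

-- B replaces A's 9-element set of formatted "x:y" strings with a direct Chebyshev-distance comparison (simpler).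

-- ===== PORT A =====
-- f"{x}:{y}" = str(x) + ":" + str(y); strings are handled on the List Char side (PySem.Chars convention)
def pvEnc (x y : Int) : List Char := PySem.Int.toChars x ++ ':' :: PySem.Int.toChars y

def shouldSegmentMove (tailPos : Int × Int) (headPos : Int × Int) : Bool :=
  let tailX := tailPos.1
  let tailY := tailPos.2
  let xPositions := PySem.List.pyRange (tailX - 1) (tailX + 2)
  let yPositions := PySem.List.pyRange (tailY - 1) (tailY + 2)
  let noNeedToMovePositions : PySem.Set (List Char) :=
    xPositions.foldl (fun s x =>
      yPositions.foldl (fun s y => PySem.Set.add s (pvEnc x y)) s) PySem.Set.empty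
  let headStr := pvEnc headPos.1 headPos.2
  !(PySem.Set.contains noNeedToMovePositions headStr)

-- ===== PORT B =====
def shouldSegmentMove_alt (tailPos : Int × Int) (headPos : Int × Int) : Bool :=
  decide (1 < |headPos.1 - tailPos.1|) || decide (1 < |headPos.2 - tailPos.2|)

-- ===== PRECONDITION & SPEC =====
def Spec_shouldSegmentMove (tailPos : Int × Int) (headPos : Int × Int) (out : Bool) : Prop := out = shouldSegmentMove_alt tailPos headPos
instance (tailPos : Int × Int) (headPos : Int × Int) (out : Bool) : Decidable (Spec_shouldSegmentMove tailPos headPos out) := by unfold Spec_shouldSegmentMove; infer_instance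

-- ===== CLAIM (what is proved, stated in full; the proofs are below) =====
def Claim_equal_shouldSegmentMove : Prop := ∀ (tailPos : Int × Int) (headPos : Int × Int), Dom_shouldSegmentMove tailPos headPos → Spec_shouldSegmentMove tailPos headPos (shouldSegmentMove tailPos headPos)

-- ===== LEMMAS AND PROOFS =====

-- recursive rendering of a natural number, the shape Nat.toDigitsCore produces
def pvGo (n : Nat) : List Char :=
  if _h : n < 10 then [Nat.digitChar n] else pvGo (n / 10) ++ [Nat.digitChar (n % 10)]
decreasing_by exact Nat.div_lt_self (by omega) (by norm_num)

theorem pvGo_ne_nil (n : Nat) : pvGo n ≠ [] := by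
  unfold pvGo; split <;> simp

theorem pvToDigitsCore_eq (fuel : Nat) : ∀ (n : Nat) (ds : List Char), n < fuel →
    Nat.toDigitsCore 10 fuel n ds = pvGo n ++ ds := by
  induction fuel with
  | zero => intro n ds h; omega
  | succ f ih =>
    intro n ds h
    rw [Nat.toDigitsCore]
    by_cases h10 : n < 10
    · have hz : n / 10 = 0 := Nat.div_eq_of_lt h10
      simp [hz, Nat.mod_eq_of_lt h10]
      rw [pvGo]
      simp [h10]
    · have hz : ¬ (n / 10 = 0) := by omega
      simp only [hz]
      rw [ih (n / 10) _ (by omega)]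
      conv_rhs => rw [pvGo]
      simp [h10]

theorem pvToChars_eq (n : Int) :
    PySem.Int.toChars n = if n < 0 then '-' :: pvGo n.natAbs else pvGo n.toNat := by
  unfold PySem.Int.toChars Nat.toDigits
  split <;> rw [pvToDigitsCore_eq _ _ _ (Nat.lt_succ_self _)] <;> simp

theorem pvGo_digits (n : Nat) : ∀ c ∈ pvGo n, c.isDigit = true := by
  induction n using Nat.strong_induction_on with
  | _ n ih =>
    intro c hc
    rw [pvGo] at hc
    by_cases h10 : n < 10
    · simp [h10] at hc
      subst hc
      interval_cases n <;> decide
    · simp [h10] at hc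
      rcases hc with hc | hc
      · exact ih (n / 10) (Nat.div_lt_self (by omega) (by norm_num)) c hc
      · subst hc
        have := Nat.mod_lt n (y := 10) (by norm_num)
        interval_cases h : n % 10 <;> decide

theorem pvGo_decode (n : Nat) : ∀ a : Nat,
    (pvGo n).foldl (fun a c => 10 * a + (c.toNat - 48)) a = a * 10 ^ (pvGo n).length + n := by
  induction n using Nat.strong_induction_on with
  | _ n ih =>
    intro a
    rw [pvGo]
    by_cases h10 : n < 10
    · have hd : (Nat.digitChar n).toNat = n + 48 := by interval_cases n <;> decide
      simp [h10, List.foldl, hd]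
      omega
    · have hd : (Nat.digitChar (n % 10)).toNat = n % 10 + 48 := by
        have := Nat.mod_lt n (y := 10) (by norm_num)
        interval_cases h : n % 10 <;> decide
      simp only [h10, dif_neg, not_false_iff, List.foldl_append, List.foldl_cons, List.foldl_nil,
        List.length_append, List.length_singleton]
      rw [ih (n / 10) (Nat.div_lt_self (by omega) (by norm_num)) a]
      rw [hd]
      have hm : n % 10 + 48 - 48 = n % 10 := by omega
      rw [hm, pow_succ]
      have := Nat.div_add_mod n 10
      ring_nf
      omega

theorem pvGo_inj {m n : Nat} (h : pvGo m = pvGo n) : m = n := by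
  have hm := pvGo_decode m 0
  have hn := pvGo_decode n 0
  rw [h] at hm
  simp [hn] at hm
  omega

theorem pvToChars_inj {m n : Int} (h : PySem.Int.toChars m = PySem.Int.toChars n) : m = n := by
  rw [pvToChars_eq, pvToChars_eq] at h
  by_cases hm : m < 0 <;> by_cases hn : n < 0 <;> simp [hm, hn] at h
  · have := pvGo_inj h; omega
  · -- '-' :: … = pvGo n.toNat, but pvGo's head is a digit
    exfalso
    obtain ⟨c, cs, hc⟩ := List.exists_cons_of_ne_nil (pvGo_ne_nil n.toNat)
    rw [hc] at h
    have := pvGo_digits n.toNat c (by rw [hc]; simp)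
    have h' : '-' = c := (List.cons.injEq _ _ _ _).mp h |>.1
    rw [← h'] at this
    exact absurd this (by decide)
  · exfalso
    obtain ⟨c, cs, hc⟩ := List.exists_cons_of_ne_nil (pvGo_ne_nil m.toNat)
    rw [hc] at h
    have := pvGo_digits m.toNat c (by rw [hc]; simp)
    have h' : c = '-' := (List.cons.injEq _ _ _ _).mp h |>.1
    rw [h'] at this
    exact absurd this (by decide)
  · have := pvGo_inj h; omega

theorem pvColon_not_mem (n : Int) : ':' ∉ PySem.Int.toChars n := by
  rw [pvToChars_eq]
  intro hmem
  split at hmem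
  · rcases List.mem_cons.mp hmem with h | h
    · exact absurd h (by decide)
    · exact absurd (pvGo_digits _ _ h) (by decide)
  · exact absurd (pvGo_digits _ _ hmem) (by decide)

theorem pvSplit_colon {as bs as' bs' : List Char}
    (ha : ':' ∉ as) (ha' : ':' ∉ as')
    (h : as ++ ':' :: bs = as' ++ ':' :: bs') : as = as' ∧ bs = bs' := by
  induction as generalizing as' with
  | nil =>
    cases as' with
    | nil => simpa using h
    | cons c cs =>
      exfalso
      simp at h
      exact ha' (by simp [← h.1])
  | cons c cs ih =>
    cases as' with
    | nil =>
      exfalso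
      simp at h
      exact ha (by simp [h.1])
    | cons c' cs' =>
      simp at h
      obtain ⟨h1, h2⟩ := h
      have := ih (fun hm => ha (List.mem_cons_of_mem _ hm)) (fun hm => ha' (List.mem_cons_of_mem _ hm)) h2
      exact ⟨by rw [h1, this.1], this.2⟩

theorem pvEnc_inj {x y x' y' : Int} (h : pvEnc x y = pvEnc x' y') : x = x' ∧ y = y' := by
  unfold pvEnc at h
  obtain ⟨h1, h2⟩ := pvSplit_colon (pvColon_not_mem x) (pvColon_not_mem x') h
  exact ⟨pvToChars_inj h1, pvToChars_inj h2⟩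

theorem pvMem_fold_add (ys : List Int) (x : Int) (e : List Char) :
    ∀ s : PySem.Set (List Char),
    e ∈ ys.foldl (fun s y => PySem.Set.add s (pvEnc x y)) s ↔ e ∈ s ∨ ∃ y ∈ ys, e = pvEnc x y := by
  induction ys with
  | nil => simp
  | cons y ys ih =>
    intro s
    simp only [List.foldl_cons, ih, PySem.Set.mem_add]
    constructor
    · rintro (⟨h | h⟩ | ⟨y', hy', h⟩)
      · exact Or.inl h
      · exact Or.inr ⟨y, by simp, h⟩
      · exact Or.inr ⟨y', by simp [hy'], h⟩
    · rintro (h | ⟨y', hy', h⟩)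
      · exact Or.inl (Or.inl h)
      · rcases List.mem_cons.mp hy' with rfl | hy'
        · exact Or.inl (Or.inr h)
        · exact Or.inr ⟨y', hy', h⟩

theorem pvMem_fold_fold (xs ys : List Int) (e : List Char) :
    ∀ s : PySem.Set (List Char),
    e ∈ xs.foldl (fun s x => ys.foldl (fun s y => PySem.Set.add s (pvEnc x y)) s) s ↔
      e ∈ s ∨ ∃ x ∈ xs, ∃ y ∈ ys, e = pvEnc x y := by
  induction xs with
  | nil => simp
  | cons x xs ih =>
    intro s
    simp only [List.foldl_cons, ih, pvMem_fold_add]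
    constructor
    · rintro (⟨h | ⟨y, hy, h⟩⟩ | ⟨x', hx', h⟩)
      · exact Or.inl h
      · exact Or.inr ⟨x, by simp, y, hy, h⟩
      · exact Or.inr ⟨x', by simp [hx'], h⟩
    · rintro (h | ⟨x', hx', h⟩)
      · exact Or.inl (Or.inl h)
      · rcases List.mem_cons.mp hx' with rfl | hx'
        · exact Or.inl (Or.inr h)
        · exact Or.inr ⟨x', hx', h⟩

-- ===== VERDICT (by name: the statement is the Claim_ definition above) =====
theorem shouldSegmentMove_spec : Claim_equal_shouldSegmentMove := by
  unfold Claim_equal_shouldSegmentMove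
  intro tailPos headPos _
  unfold Spec_shouldSegmentMove shouldSegmentMove shouldSegmentMove_alt
  have key : (∃ x ∈ PySem.List.pyRange (tailPos.1 - 1) (tailPos.1 + 2),
      ∃ y ∈ PySem.List.pyRange (tailPos.2 - 1) (tailPos.2 + 2),
      pvEnc headPos.1 headPos.2 = pvEnc x y) ↔
      (|headPos.1 - tailPos.1| ≤ 1 ∧ |headPos.2 - tailPos.2| ≤ 1) := by
    constructor
    · rintro ⟨x, hx, y, hy, h⟩
      obtain ⟨h1, h2⟩ := pvEnc_inj h
      rw [PySem.List.mem_pyRange_one] at hx hy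
      rw [abs_le, abs_le]
      omega
    · rintro ⟨h1, h2⟩
      rw [abs_le] at h1
      rw [abs_le] at h2
      exact ⟨headPos.1, PySem.List.mem_pyRange_one.mpr (by omega),
             headPos.2, PySem.List.mem_pyRange_one.mpr (by omega), rfl⟩
  simp only [PySem.Set.contains_eq_listContains, List.contains_eq_mem]
  rw [Bool.eq_iff_iff]
  simp only [Bool.not_eq_true', decide_eq_false_iff_not, Bool.or_eq_true, decide_eq_true_eq]
  rw [pvMem_fold_fold]
  simp only [PySem.Set.empty, List.not_mem_nil, false_or, key]
  rw [lt_abs, lt_abs, abs_le, abs_le]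
  omega
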